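-- pv_equiv track=rewrite | github.com/jhw/tempyra | src/tempyra/parameters.py | serialize_parameters
-- ===== SOURCE A (Python) =====
-- from collections import OrderedDict
--
-- def format_value(val) -> str:
--     """Format a value for parameters.txt."""
--     if isinstance(val, float):
--         return f"{val:g}"
--     return str(val)
--
-- def is_track_key(key: str) -> bool:
--     """Check if a parameter key is a track parameter."""
--     return key.startswith('track') and len(key) > 5 and key[5].isdigit()
--
-- def serialize_parameters(params: OrderedDict) -> str:
--     """Serialize parameters to the parameters.txt format.
--
--     Non-track parameters are sorted alphabetically.
--     Track parameters preserve their original insertion order.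
--     """
--     non_track = OrderedDict()
--     track_entries = []
--
--     for key, val in params.items():
--         if is_track_key(key):
--             track_entries.append((key, val))
--         else:
--             non_track[key] = val
--
--     lines = []
--
--     for key in sorted(non_track.keys()):
--         lines.append(f"{key}:{format_value(val)}" if False else f"{key}:{format_value(non_track[key])}")
--
--     for key, val in track_entries:
--         lines.append(f"{key}:{format_value(val)}")
--
--     return '\n'.join(lines) + '\n'
-- ===== SOURCE B (Python) =====
-- from collections import OrderedDict
--
-- def format_value(val) -> str:
--     """Format a value for parameters.txt."""
--     if isinstance(val, float):
--         return f"{val:g}"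
--     return str(val)
--
-- def is_track_key(key: str) -> bool:
--     """Check if a parameter key is a track parameter."""
--     return key.startswith('track') and len(key) > 5 and key[5].isdigit()
--
-- def serialize_parameters(params: OrderedDict) -> str:
--     """Serialize via one tagged stable sort: non-track entries carry key (0, key)
--     so they come first in alphabetical order; track entries carry the constant
--     key (1, '') so the stable sort keeps their original insertion order."""
--     def sort_key(kv):
--         return (1, '') if is_track_key(kv[0]) else (0, kv[0])
--     lines = [f"{k}:{format_value(v)}" for k, v in sorted(params.items(), key=sort_key)]
--     return '\n'.join(lines) + '\n'
-- ===== Notes on version B (the rewrite author's own statement) =====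
-- stated objective: alternative
-- what changed: Replaces A's partition into an OrderedDict plus a separate track list with two output loops by a single stable sort of params.items() under a tag key that puts non-track entries first in alphabetical key order and gives all track entries one equal tag, so the stable sort keeps their insertion order; then one formatting pass.
import Mathlib
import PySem

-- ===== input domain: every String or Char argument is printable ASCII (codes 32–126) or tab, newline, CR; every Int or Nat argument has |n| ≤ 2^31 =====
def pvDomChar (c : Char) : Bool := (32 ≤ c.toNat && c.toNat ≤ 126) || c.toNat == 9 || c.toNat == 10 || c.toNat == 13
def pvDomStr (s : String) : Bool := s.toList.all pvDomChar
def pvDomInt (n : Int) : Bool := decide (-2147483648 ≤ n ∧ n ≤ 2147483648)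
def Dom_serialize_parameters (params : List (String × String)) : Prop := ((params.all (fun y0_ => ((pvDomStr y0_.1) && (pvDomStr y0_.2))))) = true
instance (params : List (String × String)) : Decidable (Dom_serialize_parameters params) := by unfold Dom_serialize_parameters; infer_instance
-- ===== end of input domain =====

-- B replaces A's partition-into-dict-plus-list and two output loops by ONE stable sort of
-- params.items() under a tag key: non-track entries first in alphabetical key order, track
-- entries after them under one equal tag, in insertion order; alternative decomposition, same cost.


-- ===== PORT A =====

-- format_value: on this task's domain val is a str, so the float branch never fires and
-- str(val) is val itself (exact for str inputs).
def pvFormatValue (v : String) : String := v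

-- is_track_key: key.startswith('track') and len(key) > 5 and key[5].isdigit()
-- (key[5] cannot raise: short-circuit guarantees len(key) > 5, so pyGet? is some).
def pvIsTrackKey (k : String) : Bool :=
  PySem.Str.startswith k "track" &&
  decide ((5 : Int) < PySem.Str.len k) &&
  (match PySem.Str.pyGet? k 5 with
   | some c => PySem.Chars.isdigit c
   | none => false)

-- the partition loop: non_track is an OrderedDict, track_entries a list
def pvPartStep (acc : PySem.Dict String String × List (String × String))
    (kv : String × String) : PySem.Dict String String × List (String × String) :=
  if pvIsTrackKey kv.1 then (acc.1, acc.2 ++ [kv]) else (acc.1.insert kv.1 kv.2, acc.2)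

def serialize_parameters (params : List (String × String)) : String :=
  let st := params.foldl pvPartStep (PySem.Dict.empty, [])
  let non_track := st.1
  let track_entries := st.2
  -- non_track[key] cannot raise (key ranges over non_track's own keys): getD is exact here
  let lines₁ := (PySem.List.sorted non_track.keys (fun k => k) false).map
      (fun k => k ++ ":" ++ pvFormatValue (non_track.getD k ""))
  let lines := lines₁ ++ track_entries.map (fun kv => kv.1 ++ ":" ++ pvFormatValue kv.2)
  PySem.Str.join "\n" lines ++ "\n"

-- ===== PORT B =====

def pvTag1 (kv : String × String) : Int := if pvIsTrackKey kv.1 then 1 else 0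
def pvTag2 (kv : String × String) : String := if pvIsTrackKey kv.1 then "" else kv.1

def serialize_parameters_alt (params : List (String × String)) : String :=
  let lines := (PySem.List.sorted2 params pvTag1 pvTag2 false).map
      (fun kv => kv.1 ++ ":" ++ pvFormatValue kv.2)
  PySem.Str.join "\n" lines ++ "\n"

-- ===== PRECONDITION & SPEC =====
-- Pre_ excludes association lists with duplicate keys: the Python argument is an
-- OrderedDict, which cannot hold duplicate keys, so such lists represent no dict input.
def Pre_serialize_parameters (params : List (String × String)) : Prop :=
  (params.map Prod.fst).Nodup
instance (params : List (String × String)) : Decidable (Pre_serialize_parameters params) := by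
  unfold Pre_serialize_parameters; infer_instance

def pvWitness_serialize_parameters : (List (String × String)) :=
  [("volume", "3"), ("track1gain", "0.5"), ("bpm", "120"), ("track0gain", "1")]

def Spec_serialize_parameters (params : List (String × String)) (out : String) : Prop := out = serialize_parameters_alt params
instance (params : List (String × String)) (out : String) : Decidable (Spec_serialize_parameters params out) := by unfold Spec_serialize_parameters; infer_instance

-- ===== CLAIM (what is proved, stated in full; the proofs are below) =====
def Claim_equal_serialize_parameters : Prop := ∀ (params : List (String × String)), Dom_serialize_parameters params → Pre_serialize_parameters params → Spec_serialize_parameters params (serialize_parameters params)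

-- ===== LEMMAS AND PROOFS =====


-- definitional unfoldings of insertBy (kept as rfl-lemmas so simp never rewrites the comparator)
theorem pv_insertBy_nil {α : Type} (bf : α → α → Bool) (x : α) :
    PySem.List.insertBy bf x [] = [x] := rfl
theorem pv_insertBy_cons {α : Type} (bf : α → α → Bool) (x z : α) (zs : List α) :
    PySem.List.insertBy bf x (z :: zs)
      = if bf x z = true then x :: z :: zs else z :: PySem.List.insertBy bf x zs := rfl

-- insertBy lands inside the left block when it is placed before every element of the right block
theorem pv_insertBy_append (before : (String × String) → (String × String) → Bool)
    (x : String × String) (l₁ l₂ : List (String × String))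
    (h₂ : ∀ y ∈ l₂, before x y = true) :
    PySem.List.insertBy before x (l₁ ++ l₂) = PySem.List.insertBy before x l₁ ++ l₂ := by
  induction l₁ with
  | nil =>
      cases l₂ with
      | nil => rfl
      | cons y ys =>
          rw [List.nil_append, pv_insertBy_cons, if_pos (h₂ y (by simp)), pv_insertBy_nil]
          rfl
  | cons z zs ih =>
      rw [List.cons_append, pv_insertBy_cons, pv_insertBy_cons]
      by_cases h : before x z = true
      · rw [if_pos h, if_pos h]; rfl
      · rw [if_neg h, if_neg h, ih, List.cons_append]

theorem pv_insertBy_congr (bf bf' : (String × String) → (String × String) → Bool)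
    (x : String × String) (l : List (String × String))
    (h : ∀ y ∈ l, bf x y = bf' x y) :
    PySem.List.insertBy bf x l = PySem.List.insertBy bf' x l := by
  induction l with
  | nil => rfl
  | cons z zs ih =>
      rw [pv_insertBy_cons, pv_insertBy_cons, h z (by simp),
        ih (fun y hy => h y (by simp [hy]))]

-- insertBy commutes with mapping the key projection
theorem pv_insertBy_map (x : String × String) (l : List (String × String)) :
    PySem.List.insertBy (fun a b => decide (a < b)) x.1 (l.map Prod.fst)
      = (PySem.List.insertBy (fun a b => decide (a.1 < b.1)) x l).map Prod.fst := by
  induction l with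
  | nil => rfl
  | cons z zs ih =>
      rw [List.map_cons, pv_insertBy_cons, pv_insertBy_cons]
      by_cases h : decide (x.1 < z.1) = true
      · rw [if_pos h, if_pos h, List.map_cons, List.map_cons]
      · rw [if_neg h, if_neg h, List.map_cons, ih]

-- the stable sort-by-key commutes with projecting to the keys
theorem pv_sorted_map_fst (xs : List (String × String)) :
    PySem.List.sorted (xs.map Prod.fst) (fun k => k) false
      = (PySem.List.sorted xs (fun p => p.1) false).map Prod.fst := by
  induction xs using List.reverseRecOn with
  | nil => rfl
  | append_singleton ps x ih =>
      rw [PySem.List.sorted_eq_foldl_insertBy, PySem.List.sorted_eq_foldl_insertBy,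
        List.map_append, List.map_cons, List.map_nil, List.foldl_append, List.foldl_append]
      simp only [List.foldl_cons, List.foldl_nil]
      rw [← PySem.List.sorted_eq_foldl_insertBy, ← PySem.List.sorted_eq_foldl_insertBy, ih]
      exact pv_insertBy_map x _

-- the comparator of B's tagged sort
theorem pv_before2_nt_nt (x y : String × String)
    (hx : pvIsTrackKey x.1 = false) (hy : pvIsTrackKey y.1 = false) :
    (fun a b => decide (pvTag1 a < pvTag1 b) ||
       (!decide (pvTag1 b < pvTag1 a) && decide (pvTag2 a < pvTag2 b))) x y
      = decide (x.1 < y.1) := by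
  simp [pvTag1, pvTag2, hx, hy]

theorem pv_before2_trk (x y : String × String)
    (hx : pvIsTrackKey x.1 = true) :
    (fun a b => decide (pvTag1 a < pvTag1 b) ||
       (!decide (pvTag1 b < pvTag1 a) && decide (pvTag2 a < pvTag2 b))) x y = false := by
  by_cases hy : pvIsTrackKey y.1 = true
  · simp [pvTag1, pvTag2, hx, hy]
  · simp [pvTag1, pvTag2, hx, Bool.eq_false_iff.mpr hy]

theorem pv_before2_nt_trk (x y : String × String)
    (hx : pvIsTrackKey x.1 = false) (hy : pvIsTrackKey y.1 = true) :
    (fun a b => decide (pvTag1 a < pvTag1 b) ||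
       (!decide (pvTag1 b < pvTag1 a) && decide (pvTag2 a < pvTag2 b))) x y = true := by
  simp [pvTag1, pvTag2, hx, hy]

-- B's single tagged stable sort = sort of the non-track part, then the track part in order
theorem pv_sorted2_split (params : List (String × String)) :
    PySem.List.sorted2 params pvTag1 pvTag2 false
      = PySem.List.sorted (params.filter (fun p => !pvIsTrackKey p.1)) (fun p => p.1) false
        ++ params.filter (fun p => pvIsTrackKey p.1) := by
  induction params using List.reverseRecOn with
  | nil => rfl
  | append_singleton ps x ih =>
      have hstep : PySem.List.sorted2 (ps ++ [x]) pvTag1 pvTag2 false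
          = PySem.List.insertBy (fun a b => decide (pvTag1 a < pvTag1 b) ||
              (!decide (pvTag1 b < pvTag1 a) && decide (pvTag2 a < pvTag2 b)))
              x (PySem.List.sorted2 ps pvTag1 pvTag2 false) := by
        simp [PySem.List.sorted2, List.foldl_append]
      by_cases hx : pvIsTrackKey x.1 = true
      · rw [hstep, ih, PySem.List.insertBy_of_forall_not_before _ _ _
          (fun y _ => pv_before2_trk x y hx)]
        simp [List.filter_append, hx, List.append_assoc]
      · replace hx : pvIsTrackKey x.1 = false := Bool.eq_false_iff.mpr hx
        rw [hstep, ih, pv_insertBy_append _ x _ _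
          (fun y hy => pv_before2_nt_trk x y hx ((List.mem_filter.mp hy).2))]
        rw [pv_insertBy_congr _ (fun a b => decide (a.1 < b.1)) x _
          (fun y hy => pv_before2_nt_nt x y hx
            (by simpa using (List.mem_filter.mp ((PySem.List.mem_sorted _ _ _ y).mp hy)).2))]
        have hfil1 : List.filter (fun p => !pvIsTrackKey p.1) (ps ++ [x])
            = List.filter (fun p => !pvIsTrackKey p.1) ps ++ [x] := by
          simp [List.filter_append, hx]
        have hfil2 : List.filter (fun p => pvIsTrackKey p.1) (ps ++ [x])
            = List.filter (fun p => pvIsTrackKey p.1) ps := by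
          simp [List.filter_append, hx]
        have hsx : PySem.List.sorted (List.filter (fun p => !pvIsTrackKey p.1) ps ++ [x])
              (fun p => p.1) false
            = PySem.List.insertBy (fun a b => decide (a.1 < b.1)) x
              (PySem.List.sorted (List.filter (fun p => !pvIsTrackKey p.1) ps)
                (fun p => p.1) false) := by
          simp only [PySem.List.sorted_eq_foldl_insertBy, List.foldl_append, List.foldl_cons,
            List.foldl_nil]
        rw [hfil1, hfil2, hsx]

-- A's partition loop, characterised by filters
theorem pv_part (params : List (String × String)) (d : PySem.Dict String String)
    (t : List (String × String)) :
    params.foldl pvPartStep (d, t)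
      = ((params.filter (fun p => !pvIsTrackKey p.1)).foldl
            (fun d kv => d.insert kv.1 kv.2) d,
         t ++ params.filter (fun p => pvIsTrackKey p.1)) := by
  induction params generalizing d t with
  | nil => simp
  | cons x xs ih =>
      by_cases hx : pvIsTrackKey x.1 = true
      · simp [pvPartStep, hx, ih]
      · replace hx : pvIsTrackKey x.1 = false := Bool.eq_false_iff.mpr hx
        simp [pvPartStep, hx, ih]

-- ===== VERDICT (by name: the statement is the Claim_ definition above) =====
theorem serialize_parameters_spec : Claim_equal_serialize_parameters := by
  intro params _ hpre
  show serialize_parameters params = serialize_parameters_alt params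
  simp only [serialize_parameters, serialize_parameters_alt]
  rw [pv_part params PySem.Dict.empty [], pv_sorted2_split params]
  have hkeysnd : ((params.filter (fun p => !pvIsTrackKey p.1)).map Prod.fst).Nodup :=
    hpre.sublist (List.Sublist.map Prod.fst List.filter_sublist)
  generalize params.filter (fun p => !pvIsTrackKey p.1) = nt at hkeysnd ⊢
  generalize params.filter (fun p => pvIsTrackKey p.1) = tr
  have hitems : (nt.foldl (fun d kv => d.insert kv.1 kv.2) PySem.Dict.empty).items = nt := by
    have h := PySem.Dict.items_foldl_insert_fresh nt Prod.fst Prod.snd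
      (PySem.Dict.empty (κ := String) (ν := String)) (fun a _ => rfl) hkeysnd
    simpa using h
  have hkeys : (nt.foldl (fun d kv => d.insert kv.1 kv.2) PySem.Dict.empty).keys
      = nt.map Prod.fst := by
    simp only [PySem.Dict.keys, hitems]
  have hlook : ∀ p ∈ PySem.List.sorted nt (fun p => p.1) false,
      ((fun k => k ++ ":" ++ pvFormatValue
          ((nt.foldl (fun d kv => d.insert kv.1 kv.2) PySem.Dict.empty).getD k "")) ∘ Prod.fst) p
        = (fun kv => kv.1 ++ ":" ++ pvFormatValue kv.2) p := by
    intro p hp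
    have hpmem : p ∈ nt := (PySem.List.mem_sorted _ _ _ p).mp hp
    have hmemit : (p.1, p.2) ∈
        (nt.foldl (fun d kv => d.insert kv.1 kv.2) PySem.Dict.empty).items := by
      rw [hitems]; simpa using hpmem
    have hget := PySem.Dict.getD_of_mem_items _ hmemit (by rw [hkeys]; exact hkeysnd) ""
    simp only [Function.comp_apply, hget]
  simp only [hkeys, pv_sorted_map_fst, List.map_append, List.map_map, List.nil_append]
  rw [List.map_congr_left hlook]
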